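-- pv_equiv track=rewrite | github.com/mgronhol/cirrina-search | Cirrina.py | generate_sets
-- ===== SOURCE A (Python) =====
-- def generate_sets( start, rest ):
-- 	if len( rest ) < 1:
-- 		return [start]
-- 	out = []
--
-- 	for entry in rest[0]:
-- 		#print entry
-- 		new_start = start + [entry]
-- 		out.extend( generate_sets( new_start, rest[1:] ) )
--
-- 	return out
-- ===== SOURCE B (Python) =====
-- def generate_sets(start, rest):
--     # Build the product of `rest` alone as suffix tuples, right-to-left,
--     # then prepend `start` to each at the end.
--     tails = [[]]
--     for lst in reversed(rest):
--         tails = [[e] + t for e in lst for t in tails]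
--     return [start + t for t in tails]
-- ===== Notes on version B (the rewrite author's own statement) =====
-- stated objective: alternative
-- what changed: A's top-down recursion that threads the growing prefix through calls and slices rest[1:] is replaced by a right-to-left loop building the product of rest alone as suffix tuples, with start prepended once in a final map.
import Mathlib
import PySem

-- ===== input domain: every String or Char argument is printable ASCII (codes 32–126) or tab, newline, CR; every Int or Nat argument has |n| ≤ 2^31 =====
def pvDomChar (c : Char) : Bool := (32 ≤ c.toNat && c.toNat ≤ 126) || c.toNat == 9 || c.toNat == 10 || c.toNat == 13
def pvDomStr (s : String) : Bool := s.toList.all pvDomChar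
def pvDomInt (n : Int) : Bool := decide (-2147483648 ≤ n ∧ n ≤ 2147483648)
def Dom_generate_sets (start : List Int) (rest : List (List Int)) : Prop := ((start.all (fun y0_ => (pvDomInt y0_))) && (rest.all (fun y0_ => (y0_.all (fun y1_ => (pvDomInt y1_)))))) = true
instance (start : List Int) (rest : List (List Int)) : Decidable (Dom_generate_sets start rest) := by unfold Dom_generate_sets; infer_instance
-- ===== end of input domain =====

-- B replaces A's prefix-threading recursion (with rest[1:] slicing) by a right-to-left suffix-product loop and one final prepend map; objective: alternative.


-- ===== PORT A =====
def generate_sets (start : List Int) (rest : List (List Int)) : List (List Int) :=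
  match rest with
  | [] => [start]
  | l :: rs => l.foldl (fun out entry => out ++ generate_sets (start ++ [entry]) rs) []

-- ===== PORT B =====
def generate_sets_alt (start : List Int) (rest : List (List Int)) : List (List Int) :=
  (rest.reverse.foldl (fun tails lst => lst.flatMap (fun e => tails.map (fun t => e :: t))) [[]]).map
    (fun t => start ++ t)

-- ===== PRECONDITION & SPEC =====
def Spec_generate_sets (start : List Int) (rest : List (List Int)) (out : List (List Int)) : Prop := out = generate_sets_alt start rest
instance (start : List Int) (rest : List (List Int)) (out : List (List Int)) : Decidable (Spec_generate_sets start rest out) := by unfold Spec_generate_sets; infer_instance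

-- ===== CLAIM (what is proved, stated in full; the proofs are below) =====
def Claim_equal_generate_sets : Prop := ∀ (start : List Int) (rest : List (List Int)), Dom_generate_sets start rest → Spec_generate_sets start rest (generate_sets start rest)

-- ===== LEMMAS AND PROOFS =====

-- A's recursion equals start prepended to the suffix product (B's foldr view of its reversed foldl).
theorem generate_sets_eq_map_prod (rest : List (List Int)) (start : List Int) :
    generate_sets start rest
      = (rest.foldr (fun lst tails => lst.flatMap (fun e => tails.map (fun t => e :: t))) [[]]).map
          (fun t => start ++ t) := by
  induction rest generalizing start with
  | nil => simp [generate_sets]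
  | cons l rs ih =>
      show l.foldl (fun out entry => out ++ generate_sets (start ++ [entry]) rs) [] = _
      rw [PySem.List.foldl_append_eq_flatMap]
      simp only [ih, List.foldr_cons, List.map_flatMap, List.map_map, List.nil_append]
      congr 1
      funext e
      congr 1
      funext t
      simp

-- ===== VERDICT (by name: the statement is the Claim_ definition above) =====
theorem generate_sets_spec : Claim_equal_generate_sets := by
  intro start rest _
  unfold Spec_generate_sets generate_sets_alt
  rw [List.foldl_reverse, generate_sets_eq_map_prod]
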